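-- pv_equiv track=rewrite | github.com/adwardlee/leetcode_solutions | 051_N_Queens.py | indiagonal
-- ===== SOURCE A (Python) =====
-- def indiagonal(x, output):
--     ban = []
--     row = len(output)
--     for idx, num in enumerate(output):
--         ban.append(num + row - idx)
--         ban.append(num - row + idx)
--     if x not in ban:
--         return True
--     else:
--         return False
-- ===== SOURCE B (Python) =====
-- def indiagonal(x, output):
--     row = len(output)
--     return all(abs(x - num) != abs(row - idx) for idx, num in enumerate(output))
-- ===== Notes on version B (the rewrite author's own statement) =====
-- stated objective: simpler
-- what changed: Drops the materialized 'ban' list of banned column values and instead checks each placed queen directly with a diagonal-distance comparison abs(x-num) != abs(row-idx), short-circuiting via all(); no intermediate list is built.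
import Mathlib
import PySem

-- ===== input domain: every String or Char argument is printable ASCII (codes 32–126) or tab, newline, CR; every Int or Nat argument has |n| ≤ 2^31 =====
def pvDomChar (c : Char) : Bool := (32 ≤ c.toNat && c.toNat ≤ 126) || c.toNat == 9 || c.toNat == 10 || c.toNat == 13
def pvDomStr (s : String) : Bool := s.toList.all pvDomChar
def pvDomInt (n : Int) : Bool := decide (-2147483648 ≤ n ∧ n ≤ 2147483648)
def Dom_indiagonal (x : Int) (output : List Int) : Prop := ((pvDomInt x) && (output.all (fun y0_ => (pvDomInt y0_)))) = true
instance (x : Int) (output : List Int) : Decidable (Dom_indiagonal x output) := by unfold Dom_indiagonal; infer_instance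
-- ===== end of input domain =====

-- B drops the materialized ban-list and checks each placed queen directly with a diagonal-distance comparison (simpler).


-- ===== PORT A =====
def indiagonal (x : Int) (output : List Int) : Bool :=
  let row : Int := output.length
  let ban : List Int := (PySem.List.enumerate output).foldl
    (fun acc p => (acc ++ [p.2 + row - p.1]) ++ [p.2 - row + p.1]) []
  if x ∉ ban then true else false

-- ===== PORT B =====
def indiagonal_alt (x : Int) (output : List Int) : Bool :=
  let row : Int := output.length
  (PySem.List.enumerate output).all (fun p => (x - p.2).natAbs != (row - p.1).natAbs)

-- ===== PRECONDITION & SPEC =====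
def Spec_indiagonal (x : Int) (output : List Int) (out : Bool) : Prop := out = indiagonal_alt x output
instance (x : Int) (output : List Int) (out : Bool) : Decidable (Spec_indiagonal x output out) := by unfold Spec_indiagonal; infer_instance

-- ===== CLAIM (what is proved, stated in full; the proofs are below) =====
def Claim_equal_indiagonal : Prop := ∀ (x : Int) (output : List Int), Dom_indiagonal x output → Spec_indiagonal x output (indiagonal x output)

-- ===== LEMMAS AND PROOFS =====

-- A's ban list is the flatMap of the two banned columns per placed queen.
theorem indiagonal_ban_eq (row : Int) (l : List (Int × Int)) (acc : List Int) :
    l.foldl (fun acc p => (acc ++ [p.2 + row - p.1]) ++ [p.2 - row + p.1]) acc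
      = acc ++ l.flatMap (fun p => [p.2 + row - p.1, p.2 - row + p.1]) := by
  have h : (fun (acc : List Int) (p : Int × Int) => (acc ++ [p.2 + row - p.1]) ++ [p.2 - row + p.1])
      = fun acc p => acc ++ [p.2 + row - p.1, p.2 - row + p.1] := by
    funext acc p; simp
  rw [h, PySem.List.foldl_append_eq_flatMap]

theorem indiagonal_spec : Claim_equal_indiagonal := by
  intro x output _
  unfold Spec_indiagonal indiagonal indiagonal_alt
  simp only []
  rw [indiagonal_ban_eq]
  rw [Bool.eq_iff_iff]
  simp only [List.nil_append, List.mem_flatMap, List.mem_cons, List.not_mem_nil, or_false,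
    List.all_eq_true, bne_iff_ne, ne_eq]
  constructor
  · intro h
    split at h
    case isTrue hn =>
      intro p hp
      obtain ⟨k, hk, rfl⟩ := (PySem.List.mem_enumerate_iff _ _ _).mp hp
      simp only [not_exists, not_and, not_or] at hn
      have := hn (0 + (k : Int), output[k]) hp
      simp only at this
      omega
    case isFalse => exact absurd h (by simp)
  · intro hall
    rw [if_pos]
    rintro ⟨p, hp, hx⟩
    obtain ⟨k, hk, rfl⟩ := (PySem.List.mem_enumerate_iff _ _ _).mp hp
    have := hall _ hp
    simp only at this hx
    omega
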